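-- pv_equiv track=rewrite | github.com/S3pR78/Bachelor_Thesis | code/src/evaluation/dataset_loader.py | count_field_values
-- ===== SOURCE A (Python) =====
-- from typing import Any
--
-- def count_field_values(
--     entries: list[dict[str, Any]],
--     field_name: str,
-- ) -> dict[str, int]:
--     counts: dict[str, int] = {}
--
--     for entry in entries:
--         if not isinstance(entry, dict):
--             continue
--
--         value = entry.get(field_name)
--
--         if value is None:
--             continue
--
--         counts[value] = counts.get(value, 0) + 1
--
--     return dict(sorted(counts.items()))
-- ===== SOURCE B (Python) =====
-- def count_field_values(
--     entries,
--     field_name,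
-- ):
--     # Collect the qualifying values, sort them, then emit one (value, run length)
--     # pair per run of equal values in the sorted sequence.
--     values = sorted(
--         entry.get(field_name)
--         for entry in entries
--         if isinstance(entry, dict) and entry.get(field_name) is not None
--     )
--     result = {}
--     i, n = 0, len(values)
--     while i < n:
--         j = i + 1
--         while j < n and values[j] == values[i]:
--             j += 1
--         result[values[i]] = j - i
--         i = j
--     return result
-- ===== Notes on version B (the rewrite author's own statement) =====
-- stated objective: alternative
-- what changed: Replaces the incremental counter dict plus final sort of its items by sorting the collected field values once and run-length grouping the sorted sequence, so counts come from run lengths and the output order comes for free.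
import Mathlib
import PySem

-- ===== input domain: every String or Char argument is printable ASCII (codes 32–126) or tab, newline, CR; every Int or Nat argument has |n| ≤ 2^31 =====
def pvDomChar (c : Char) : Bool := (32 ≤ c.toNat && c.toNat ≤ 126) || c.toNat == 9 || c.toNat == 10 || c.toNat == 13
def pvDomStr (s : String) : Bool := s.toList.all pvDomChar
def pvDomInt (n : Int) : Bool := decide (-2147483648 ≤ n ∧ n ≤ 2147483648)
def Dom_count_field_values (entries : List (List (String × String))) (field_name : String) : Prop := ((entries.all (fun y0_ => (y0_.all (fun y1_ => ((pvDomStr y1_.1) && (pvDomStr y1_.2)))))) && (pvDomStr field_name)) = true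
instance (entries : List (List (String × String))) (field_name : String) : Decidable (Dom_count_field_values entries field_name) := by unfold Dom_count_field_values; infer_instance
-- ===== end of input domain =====

-- B replaces A's per-element counter-dict updates followed by a sort of the items with one
-- sort of the collected field values followed by a run-length grouping scan (alternative
-- decomposition of the same counting task).

-- ===== PORT A =====
def count_field_values (entries : List (List (String × String))) (field_name : String) : List (String × Int) :=
  let counts : PySem.Dict String Int :=
    entries.foldl (fun counts entry =>
      match PySem.Dict.get? ⟨entry⟩ field_name with
      | none => counts                                   -- value is None: continue
      | some value => counts.insert value (counts.getD value 0 + 1))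
      PySem.Dict.empty
  PySem.List.sorted counts.items (fun p => toLex p)      -- dict(sorted(counts.items())): tuples compare lexicographically

-- ===== PORT B =====
-- one step of Source B's outer while loop: the inner `while j < n and values[j] == values[i]`
-- scan of the run starting at i (takeWhile), count j - i, then the jump i = j (dropWhile)
def pvGroupRuns : List String → List (String × Int)
  | [] => []
  | v :: rest =>
      (v, 1 + ((rest.takeWhile (fun x => x == v)).length : Int)) ::
        pvGroupRuns (rest.dropWhile (fun x => x == v))
termination_by s => s.length
decreasing_by simpa using Nat.lt_succ_of_le (List.length_dropWhile_le _ _)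

def count_field_values_alt (entries : List (List (String × String))) (field_name : String) : List (String × Int) :=
  let values := PySem.List.sorted
    (entries.filterMap (fun entry => PySem.Dict.get? ⟨entry⟩ field_name)) id
  pvGroupRuns values

-- ===== PRECONDITION & SPEC =====
def Spec_count_field_values (entries : List (List (String × String))) (field_name : String) (out : List (String × Int)) : Prop := out = count_field_values_alt entries field_name
instance (entries : List (List (String × String))) (field_name : String) (out : List (String × Int)) : Decidable (Spec_count_field_values entries field_name out) := by unfold Spec_count_field_values; infer_instance

-- ===== CLAIM (what is proved, stated in full; the proofs are below) =====
def Claim_equal_count_field_values : Prop := ∀ (entries : List (List (String × String))) (field_name : String), Dom_count_field_values entries field_name → Spec_count_field_values entries field_name (count_field_values entries field_name)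

-- ===== LEMMAS AND PROOFS =====

-- In a sorted list v :: rest, every element surviving the dropWhile of the leading
-- run of v's is strictly greater than v.
theorem pvTail_gt (v : String) (rest : List String) (hs : (v :: rest).Pairwise (· ≤ ·)) :
    ∀ y ∈ rest.dropWhile (fun x => x == v), v < y := by
  intro y hy
  have hvle : ∀ z ∈ rest, v ≤ z := (List.pairwise_cons.mp hs).1
  have hrest : rest.Pairwise (· ≤ ·) := (List.pairwise_cons.mp hs).2
  cases htl : rest.dropWhile (fun x => x == v) with
  | nil => rw [htl] at hy; cases hy
  | cons w t' =>
    have hwv : ¬ w = v := by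
      have h2 : rest.dropWhile (fun x => x == v) ≠ [] := by simp [htl]
      have := List.head_dropWhile_not (fun x => x == v) h2
      simpa [htl] using this
    have hwrest : w ∈ rest := (List.dropWhile_sublist _).subset (htl ▸ List.mem_cons_self)
    have hvw : v < w := lt_of_le_of_ne (hvle w hwrest) (Ne.symm hwv)
    have htpw : (w :: t').Pairwise (· ≤ ·) := htl ▸ hrest.sublist (List.dropWhile_sublist _)
    rw [htl] at hy
    rcases List.mem_cons.mp hy with rfl | hy'
    · exact hvw
    · exact lt_of_lt_of_le hvw ((List.pairwise_cons.mp htpw).1 y hy')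

-- On a sorted list, pvGroupRuns produces strictly increasing keys, exactly the members
-- of the list, and as second components their multiplicities.
theorem pvGroupRuns_spec (s : List String) (hs : s.Pairwise (· ≤ ·)) :
    ((pvGroupRuns s).map Prod.fst).Pairwise (· < ·) ∧
    (∀ v, v ∈ (pvGroupRuns s).map Prod.fst ↔ v ∈ s) ∧
    (∀ p ∈ pvGroupRuns s, p.2 = (s.count p.1 : Int)) := by
  induction s using pvGroupRuns.induct with
  | case1 => simp [pvGroupRuns]
  | case2 v rest ih =>
    have hrest : rest.Pairwise (· ≤ ·) := (List.pairwise_cons.mp hs).2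
    have htailpw : (rest.dropWhile (fun x => x == v)).Pairwise (· ≤ ·) :=
      hrest.sublist (List.dropWhile_sublist _)
    have hrunv : ∀ x ∈ rest.takeWhile (fun x => x == v), x = v := by
      intro x hx
      simpa using List.mem_takeWhile_imp hx
    have htailgt := pvTail_gt v rest hs
    have hsplit : rest.takeWhile (fun x => x == v) ++ rest.dropWhile (fun x => x == v) = rest :=
      List.takeWhile_append_dropWhile
    obtain ⟨ihpw, ihmem, ihcnt⟩ := ih htailpw
    refine ⟨?_, ?_, ?_⟩
    · rw [pvGroupRuns]
      simp only [List.map_cons, List.pairwise_cons]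
      exact ⟨fun b hb => htailgt b ((ihmem b).mp hb), ihpw⟩
    · intro x
      rw [pvGroupRuns]
      simp only [List.map_cons, List.mem_cons, ihmem]
      constructor
      · rintro (rfl | hx)
        · exact Or.inl rfl
        · exact Or.inr ((List.dropWhile_sublist _).subset hx)
      · rintro (rfl | hx')
        · exact Or.inl rfl
        · rw [← hsplit] at hx'
          rcases List.mem_append.mp hx' with h | h
          · exact Or.inl (hrunv x h)
          · exact Or.inr h
    · intro p hp
      rw [pvGroupRuns] at hp
      rcases List.mem_cons.mp hp with rfl | hp'
      · have h1 : (rest.takeWhile (fun x => x == v)).count v =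
            (rest.takeWhile (fun x => x == v)).length := by
          rw [List.count_eq_length]
          intro x hx; exact (hrunv x hx) ▸ rfl
        have h2 : (rest.dropWhile (fun x => x == v)).count v = 0 := by
          rw [List.count_eq_zero]
          intro hv; exact absurd rfl (ne_of_gt (htailgt v hv))
        have hcr : rest.count v = (rest.takeWhile (fun x => x == v)).length := by
          have hc := congrArg (List.count v) hsplit
          rw [List.count_append] at hc
          omega
        simp only [List.count_cons_self, hcr]
        push_cast
        ring
      · have h1 := ihcnt p hp'
        have hfst : p.1 ∈ rest.dropWhile (fun x => x == v) :=
          (ihmem p.1).mp (List.mem_map_of_mem hp')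
        have hgt := htailgt p.1 hfst
        have hcv : (rest.takeWhile (fun x => x == v)).count p.1 = 0 := by
          rw [List.count_eq_zero]
          intro h
          exact absurd (hrunv _ h) (ne_of_gt hgt)
        have hvz : (v :: rest).count p.1 = (rest.dropWhile (fun x => x == v)).count p.1 := by
          have hc := congrArg (List.count p.1) hsplit
          rw [List.count_append, hcv] at hc
          rw [List.count_cons, ← hc]
          simp
          exact (ne_of_gt hgt).symm
        rw [h1, hvz]

-- folding with a skip-on-none step equals folding the filterMap (stated in the port's
-- own match shape: the None branch first, as in A's `continue`)
theorem foldl_skip_none (f : List (String × String) → Option String)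
    (g : PySem.Dict String Int → String → PySem.Dict String Int)
    (l : List (List (String × String))) (init : PySem.Dict String Int) :
    l.foldl (fun x y => match f y with | none => x | some b => g x b) init =
      (l.filterMap f).foldl g init := by
  induction l generalizing init with
  | nil => rfl
  | cons a l ih => cases h : f a <;> simp [h, ih]

-- A's loop over entries builds exactly the counter of the filtered-out values.
theorem count_field_values_eq_sorted_counter (entries : List (List (String × String)))
    (field_name : String) :
    count_field_values entries field_name =
      PySem.List.sorted
        (PySem.Dict.counter
          (entries.filterMap (fun entry => PySem.Dict.get? ⟨entry⟩ field_name))).items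
        (fun p => toLex p) := by
  unfold count_field_values
  rw [foldl_skip_none (fun entry => PySem.Dict.get? ⟨entry⟩ field_name)
        (fun x b => x.insert b (x.getD b 0 + 1)) entries PySem.Dict.empty,
      PySem.Dict.foldl_insert_getD_add_one_eq_counter]

theorem counter_items_eq (vals : List String) :
    (PySem.Dict.counter vals).items =
      (PySem.Set.ofList vals).map (fun k => (k, (vals.count k : Int))) := by
  have hnodup : (PySem.Dict.counter vals).keys.Nodup := by
    rw [PySem.Dict.keys_counter]; exact PySem.Set.nodup_ofList _
  rw [PySem.Dict.items_eq_map_keys _ hnodup 0, PySem.Dict.keys_counter]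
  exact List.map_congr_left (fun k _ => by rw [PySem.Dict.getD_counter])

-- Sorting the counter's items lexicographically gives exactly the run-length grouping
-- of the sorted value list.
theorem sorted_counter_eq_groupRuns (vals : List String) :
    PySem.List.sorted (PySem.Dict.counter vals).items (fun p => toLex p) =
      pvGroupRuns (PySem.List.sorted vals id) := by
  have hsperm : (PySem.List.sorted vals id).Perm vals := PySem.List.sorted_perm vals id false
  have hspw : (PySem.List.sorted vals id).Pairwise (· ≤ ·) := by
    simpa using PySem.List.sorted_pairwise vals id
  obtain ⟨hpw, hmem, hcnt⟩ := pvGroupRuns_spec _ hspw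
  have hKnodup : ((pvGroupRuns (PySem.List.sorted vals id)).map Prod.fst).Nodup :=
    hpw.imp ne_of_lt
  have hgrs_eq : pvGroupRuns (PySem.List.sorted vals id) =
      ((pvGroupRuns (PySem.List.sorted vals id)).map Prod.fst).map
        (fun k => (k, (vals.count k : Int))) := by
    rw [List.map_map]
    conv_lhs => rw [← List.map_id (pvGroupRuns (PySem.List.sorted vals id))]
    apply List.map_congr_left
    intro p hp
    have := hcnt p hp
    have hc : (PySem.List.sorted vals id).count p.1 = vals.count p.1 := hsperm.count_eq p.1
    simp only [id, Function.comp]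
    exact Prod.ext rfl (by rw [this, hc])
  have hKperm : ((pvGroupRuns (PySem.List.sorted vals id)).map Prod.fst).Perm
      (PySem.Set.ofList vals) := by
    rw [List.perm_ext_iff_of_nodup hKnodup (PySem.Set.nodup_ofList _)]
    intro x
    rw [hmem x, PySem.Set.mem_ofList, hsperm.mem_iff]
  have hperm : (pvGroupRuns (PySem.List.sorted vals id)).Perm
      ((PySem.Dict.counter vals).items) := by
    rw [counter_items_eq, hgrs_eq]
    exact hKperm.map _
  have hplex : (pvGroupRuns (PySem.List.sorted vals id)).Pairwise
      (fun a b => (fun p => toLex p) a < (fun p => toLex p) b) := by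
    have := List.pairwise_map.mp hpw
    exact this.imp (fun h => Prod.Lex.toLex_lt_toLex.mpr (Or.inl h))
  exact PySem.List.sorted_eq_of_perm_of_pairwise_lt _ _ _ hperm hplex

-- ===== VERDICT (by name: the statement is the Claim_ definition above) =====
theorem count_field_values_spec : Claim_equal_count_field_values := by
  intro entries field_name _
  unfold Spec_count_field_values
  rw [count_field_values_eq_sorted_counter, sorted_counter_eq_groupRuns]
  rfl
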